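-- pv_equiv track=rewrite | github.com/quasylab/spear | redblue.py | variation_blue
-- ===== SOURCE A (Python) =====
-- def switch_red_blue(a):
--     if a=="R":
--         return "B"
--     elif a=="RT":
--         return "BT"
--     else:
--         a
--
-- def variation_blue(state,n):
--     new_state = [""]*len(state)
--     for i in range(len(state)):
--         if (state[i]=="R" or state[i]=="RT") and n>0:
--             new_state[i] = switch_red_blue(state[i])
--             n = n-1
--         else:
--             new_state[i] = state[i]
--     return new_state
-- ===== SOURCE B (Python) =====
-- SWITCH = {"R": "B", "RT": "BT"}
--
-- def variation_blue(state, n):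
--     red = [i for i, s in enumerate(state) if s in SWITCH]
--     to_switch = set(red[:max(n, 0)])
--     return [SWITCH[s] if i in to_switch else s for i, s in enumerate(state)]
-- ===== Notes on version B (the rewrite author's own statement) =====
-- stated objective: alternative
-- what changed: Replaces the single loop threading a decrementing counter by two passes: first collect the indices of red states and keep the first max(n,0) of them as a set, then build the output with one comprehension replacing exactly those positions.
import Mathlib
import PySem

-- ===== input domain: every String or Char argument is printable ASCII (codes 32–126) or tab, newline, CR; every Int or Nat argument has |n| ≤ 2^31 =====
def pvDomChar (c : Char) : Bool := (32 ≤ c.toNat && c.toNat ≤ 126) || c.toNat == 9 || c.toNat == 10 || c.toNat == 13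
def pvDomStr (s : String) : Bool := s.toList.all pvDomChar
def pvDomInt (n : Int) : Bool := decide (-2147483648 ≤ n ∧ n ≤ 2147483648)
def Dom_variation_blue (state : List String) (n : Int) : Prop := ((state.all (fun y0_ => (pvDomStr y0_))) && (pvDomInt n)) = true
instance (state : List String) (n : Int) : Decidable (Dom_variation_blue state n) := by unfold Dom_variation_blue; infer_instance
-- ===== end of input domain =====

-- B separates the work into two passes (collect the red indices to switch, then rebuild by position) instead of A's single counter-threading loop; alternative decomposition, same cost.
-- ===== PORT A =====
-- else branch of the Python returns None; it is unreachable from variation_blue's guarded call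
def switch_red_blue (a : String) : String :=
  if a == "R" then "B" else if a == "RT" then "BT" else a

def variation_blue (state : List String) (n : Int) : List String :=
  match state, n with
  | [], _ => []
  | s :: rest, n =>
    if (s == "R" || s == "RT") && n > 0 then
      switch_red_blue s :: variation_blue rest (n - 1)
    else
      s :: variation_blue rest n

-- ===== PORT B =====
-- SWITCH[s] for s in {"R","RT"}
def switchLookup (s : String) : String := if s == "R" then "B" else "BT"

def variation_blue_alt (state : List String) (n : Int) : List String :=
  let red := (PySem.List.enumerate state 0).filterMap
    (fun p => if p.2 == "R" || p.2 == "RT" then some p.1 else none)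
  let toSwitch := red.take (max n 0).toNat
  (PySem.List.enumerate state 0).map
    (fun p => if toSwitch.contains p.1 then switchLookup p.2 else p.2)

-- ===== PRECONDITION & SPEC =====
def Spec_variation_blue (state : List String) (n : Int) (out : List String) : Prop := out = variation_blue_alt state n
instance (state : List String) (n : Int) (out : List String) : Decidable (Spec_variation_blue state n out) := by unfold Spec_variation_blue; infer_instance

-- ===== CLAIM (what is proved, stated in full; the proofs are below) =====
def Claim_equal_variation_blue : Prop := ∀ (state : List String) (n : Int), Dom_variation_blue state n → Spec_variation_blue state n (variation_blue state n)

-- ===== LEMMAS AND PROOFS =====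

def redIdx (l : List (Int × String)) : List Int :=
  l.filterMap (fun p => if p.2 == "R" || p.2 == "RT" then some p.1 else none)

lemma redIdx_ge (xs : List String) (s : Int) (j : Int) (h : j ∈ redIdx (PySem.List.enumerate xs s)) : s ≤ j := by
  simp only [redIdx, List.mem_filterMap] at h
  obtain ⟨p, hp, hpj⟩ := h
  rw [PySem.List.mem_enumerate_iff] at hp
  obtain ⟨k, hk, rfl⟩ := hp
  split at hpj
  · cases hpj; omega
  · cases hpj

lemma contains_take_false (xs : List String) (s j : Int) (k : Nat) (hlt : j < s)
    : (List.take k (redIdx (PySem.List.enumerate xs s))).contains j = false := by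
  rw [List.contains_eq_mem]
  simp only [decide_eq_false_iff_not]
  intro h
  have := redIdx_ge xs s j (List.take_subset _ _ h)
  omega

lemma variation_blue_nonpos (xs : List String) (n : Int) (h : ¬ n > 0) : variation_blue xs n = xs := by
  induction xs with
  | nil => simp [variation_blue]
  | cons x r ih => simp [variation_blue, h, ih]

lemma variation_blue_general (state : List String) (n : Int) (s : Int) :
    variation_blue state n =
      (PySem.List.enumerate state s).map
        (fun p => if (List.take (max n 0).toNat (redIdx (PySem.List.enumerate state s))).contains p.1
                  then switchLookup p.2 else p.2) := by
  induction state generalizing n s with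
  | nil => simp [variation_blue, PySem.List.enumerate_nil]
  | cons x rest ih =>
    rw [PySem.List.enumerate_cons]
    by_cases hn : n > 0
    · by_cases hred : (x == "R" || x == "RT") = true
      · have hxp : x = "R" ∨ x = "RT" := by
          rcases Bool.or_eq_true_iff.mp hred with h | h
          · exact Or.inl (eq_of_beq h)
          · exact Or.inr (eq_of_beq h)
        have hredIdx : redIdx ((s, x) :: PySem.List.enumerate rest (s+1))
            = s :: redIdx (PySem.List.enumerate rest (s+1)) := by
          simp [redIdx, hxp]
        have hA : variation_blue (x :: rest) n = switch_red_blue x :: variation_blue rest (n-1) := by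
          simp [variation_blue, hred, hn]
        rw [hA, hredIdx]
        have hk : (max n 0).toNat = (max (n-1) 0).toNat + 1 := by omega
        rw [hk, List.take_succ_cons, List.map_cons]
        congr 1
        · have hsw : switch_red_blue x = switchLookup x := by
            rcases hxp with h | h <;> simp [switch_red_blue, switchLookup, h]
          simp [hsw]
        · rw [ih (n-1) (s+1)]
          apply List.map_congr_left
          intro p hp
          rw [PySem.List.mem_enumerate_iff] at hp
          obtain ⟨kk, hkk, rfl⟩ := hp
          have hne : ((s + 1 + (kk:Int)) == s) = false := by
            simp only [beq_eq_false_iff_ne, ne_eq]; omega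
          simp only [List.contains_cons, hne, Bool.false_or]
      · have hxp : ¬ (x = "R" ∨ x = "RT") := by
          intro h; rcases h with h | h <;> simp [h] at hred
        have hredIdx : redIdx ((s, x) :: PySem.List.enumerate rest (s+1))
            = redIdx (PySem.List.enumerate rest (s+1)) := by
          simp [redIdx, hxp]
        have hA : variation_blue (x :: rest) n = x :: variation_blue rest n := by
          simp [variation_blue, hred]
        rw [hA, hredIdx, List.map_cons]
        congr 1
        · rw [contains_take_false rest (s+1) s _ (by omega)]
          simp
        · exact ih n (s+1)
    · have hk : (max n 0).toNat = 0 := by omega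
      rw [variation_blue_nonpos (x :: rest) n hn, hk]
      simp [PySem.List.map_snd_enumerate]

-- ===== VERDICT (by name: the statement is the Claim_ definition above) =====
theorem variation_blue_spec : Claim_equal_variation_blue := by
  intro state n _
  unfold Spec_variation_blue variation_blue_alt
  simpa [redIdx] using variation_blue_general state n 0
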